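-- pv_equiv track=rewrite | github.com/Waldflamme/Study | Семенар 28.04/Stack4.py | no_neg
-- ===== SOURCE A (Python) =====
-- def no_neg(st):
--
--     no_neg_st = []
--     while st:
--         val = st.pop()
--         if val>=0:
--             no_neg_st.append(val)
--
--     res_st = []
--     while no_neg_st:
--         res_st.append(no_neg_st.pop())
--
--     return res_st
-- ===== SOURCE B (Python) =====
-- def no_neg(st):
--     # One forward pass: keep non-negatives in original order.
--     # A drains st; we reproduce that side effect with an explicit clear.
--     res = [v for v in st if v >= 0]
--     st.clear()
--     return res
-- ===== Notes on version B (the rewrite author's own statement) =====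
-- stated objective: simpler
-- what changed: Replaces A's two pop loops (filter into a reversed scratch stack, then pop again to re-reverse) with a single forward comprehension plus an explicit clear of the input stack.
import Mathlib
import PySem

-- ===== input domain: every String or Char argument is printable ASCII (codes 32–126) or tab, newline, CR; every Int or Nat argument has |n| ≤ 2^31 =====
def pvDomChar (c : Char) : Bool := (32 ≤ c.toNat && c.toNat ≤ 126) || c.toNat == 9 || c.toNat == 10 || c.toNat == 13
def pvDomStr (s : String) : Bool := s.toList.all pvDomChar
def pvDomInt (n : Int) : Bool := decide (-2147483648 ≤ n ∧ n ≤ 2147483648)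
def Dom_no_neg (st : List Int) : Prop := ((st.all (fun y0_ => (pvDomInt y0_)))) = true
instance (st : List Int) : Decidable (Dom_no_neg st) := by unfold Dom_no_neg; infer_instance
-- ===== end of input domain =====

-- B replaces A's two pop-loops with one forward filter; equivalence is about the
-- return value (both Pythons leave st empty: A drains it, B clears it).

-- ===== PORT A =====
-- 'while st: val = st.pop()' pops from the END of st; we walk st.reverse so each
-- head is exactly the next popped value (same values, same order of processing).
def noNegLoop1 : List Int → List Int → List Int
  | [], acc => acc
  | v :: rest, acc => noNegLoop1 rest (if v ≥ 0 then acc ++ [v] else acc)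

-- second loop: pop everything from no_neg_st, appending to res_st (a reversal)
def noNegLoop2 : List Int → List Int → List Int
  | [], acc => acc
  | v :: rest, acc => noNegLoop2 rest (acc ++ [v])

def no_neg (st : List Int) : List Int :=
  let no_neg_st := noNegLoop1 st.reverse []
  noNegLoop2 no_neg_st.reverse []

-- ===== PORT B =====
def no_neg_alt (st : List Int) : List Int := st.filter (fun v => decide (v ≥ 0))

-- ===== PRECONDITION & SPEC =====
def Spec_no_neg (st : List Int) (out : List Int) : Prop := out = no_neg_alt st
instance (st : List Int) (out : List Int) : Decidable (Spec_no_neg st out) := by unfold Spec_no_neg; infer_instance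

-- ===== CLAIM (what is proved, stated in full; the proofs are below) =====
def Claim_equal_no_neg : Prop := ∀ (st : List Int), Dom_no_neg st → Spec_no_neg st (no_neg st)

-- ===== LEMMAS AND PROOFS =====
theorem noNegLoop1_eq (r acc : List Int) :
    noNegLoop1 r acc = acc ++ r.filter (fun v => decide (v ≥ 0)) := by
  induction r generalizing acc with
  | nil => simp [noNegLoop1]
  | cons v rest ih =>
    simp only [noNegLoop1, ih, List.filter]
    by_cases h : v ≥ 0 <;> simp [h]

theorem noNegLoop2_eq (r acc : List Int) : noNegLoop2 r acc = acc ++ r := by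
  induction r generalizing acc with
  | nil => simp [noNegLoop2]
  | cons v rest ih => simp [noNegLoop2, ih]

-- ===== VERDICT (by name: the statement is the Claim_ definition above) =====
theorem no_neg_spec : Claim_equal_no_neg := by
  intro st _
  show no_neg st = no_neg_alt st
  simp [no_neg, no_neg_alt, noNegLoop1_eq, noNegLoop2_eq, List.filter_reverse]
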